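-- pv_equiv track=rewrite | github.com/WiiXLinux/Einfuerung-in-die-Algorithmik-SS23-CAU-Kiel | HA6/A6.4.py | prev_pos
-- ===== SOURCE A (Python) =====
-- def prev_pos(pos):
--     i = len(pos) - 1
--     cont = True
--     while i >= 0 and cont:
--         if pos[i] == 'r':
--             pos = pos [:i] + 'l' + pos[i+1:]
--             cont = False
--         else: # pos[i] == 'l'
--             pos = pos [:i] + 'r' + pos[i+1:]
--         i = i - 1
--     if cont: # overflow means one l to much
--         return pos[1:]
--     else:
--         return pos
-- ===== SOURCE B (Python) =====
-- def prev_pos(pos):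
--     j = pos.rfind('r')
--     if j == -1:
--         return 'r' * (len(pos) - 1)
--     return pos[:j] + 'l' + 'r' * (len(pos) - j - 1)
-- ===== Notes on version B (the rewrite author's own statement) =====
-- stated objective: faster
-- what changed: Instead of walking from the right and rewriting the whole string by slicing at every step, B locates the rightmost 'r' with a single rfind and builds the result in one step from a slice plus string repetition.
import Mathlib
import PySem

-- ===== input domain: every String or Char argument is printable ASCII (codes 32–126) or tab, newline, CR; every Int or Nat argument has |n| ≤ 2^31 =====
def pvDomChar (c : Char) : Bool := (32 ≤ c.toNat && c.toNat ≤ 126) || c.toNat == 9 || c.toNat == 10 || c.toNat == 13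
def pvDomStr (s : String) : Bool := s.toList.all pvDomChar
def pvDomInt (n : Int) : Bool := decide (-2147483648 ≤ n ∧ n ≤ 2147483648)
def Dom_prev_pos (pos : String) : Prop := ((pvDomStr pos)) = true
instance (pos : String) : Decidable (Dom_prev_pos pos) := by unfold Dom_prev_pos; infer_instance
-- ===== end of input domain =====

-- B replaces A's right-to-left rewrite loop (which rebuilds the string each step) by rfind + slice + repetition, one O(n) construction.

-- ===== PORT A =====
-- the while loop of A: fuel k stands for i+1 (loop runs while i ≥ 0 and cont)
def prevPosLoopA : List Char → Nat → List Char × Bool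
  | pos, 0 => (pos, true)
  | pos, k+1 =>
    if PySem.List.pyGet? pos (k : Int) = some 'r' then
      (PySem.List.slice pos none (some (k : Int)) ++ ['l'] ++
         PySem.List.slice pos (some ((k : Int) + 1)) none, false)
    else
      prevPosLoopA (PySem.List.slice pos none (some (k : Int)) ++ ['r'] ++
         PySem.List.slice pos (some ((k : Int) + 1)) none) k

def prev_pos (pos : String) : String :=
  let r := prevPosLoopA pos.toList pos.toList.length
  if r.2 then String.ofList (PySem.List.slice r.1 (some 1) none)   -- overflow: return pos[1:]
  else String.ofList r.1

-- ===== PORT B =====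
def prev_pos_alt (pos : String) : String :=
  let s := pos.toList
  let j := PySem.Chars.rfind s ['r']
  if j = -1 then String.ofList (PySem.List.pyRepeat ['r'] ((s.length : Int) - 1))
  else String.ofList (PySem.List.slice s none (some j) ++ ['l'] ++
         PySem.List.pyRepeat ['r'] ((s.length : Int) - j - 1))

-- ===== PRECONDITION & SPEC =====
def Spec_prev_pos (pos : String) (out : String) : Prop := out = prev_pos_alt pos
instance (pos : String) (out : String) : Decidable (Spec_prev_pos pos out) := by unfold Spec_prev_pos; infer_instance

-- ===== CLAIM (what is proved, stated in full; the proofs are below) =====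
def Claim_equal_prev_pos : Prop := ∀ (pos : String), Dom_prev_pos pos → Spec_prev_pos pos (prev_pos pos)

-- ===== LEMMAS AND PROOFS =====

-- index (< k) of the rightmost 'r' among the first k characters, if any
def lastR (s : List Char) : Nat → Option Nat
  | 0 => none
  | k+1 => if s[k]? = some 'r' then some k else lastR s k

theorem lastR_congr (s₁ s₂ : List Char) (k : Nat) (h : ∀ i, i < k → s₁[i]? = s₂[i]?) :
    lastR s₁ k = lastR s₂ k := by
  induction k with
  | zero => rfl
  | succ k ih =>
    simp only [lastR, h k (Nat.lt_succ_self k)]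
    rw [ih (fun i hi => h i (Nat.lt_succ_of_lt hi))]

theorem lastR_lt (s : List Char) (k : Nat) (j : Nat) (h : lastR s k = some j) : j < k := by
  induction k with
  | zero => simp [lastR] at h
  | succ k ih =>
    simp only [lastR] at h
    split at h
    · simp only [Option.some.injEq] at h; omega
    · exact Nat.lt_succ_of_lt (ih h)

theorem loopA_spec (k : Nat) (s : List Char) (hk : k ≤ s.length) :
    prevPosLoopA s k =
      match lastR s k with
      | some j => (s.take j ++ 'l' :: List.replicate (k - 1 - j) 'r' ++ s.drop k, false)
      | none => (List.replicate k 'r' ++ s.drop k, true) := by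
  induction k generalizing s with
  | zero => simp [prevPosLoopA, lastR]
  | succ k ih =>
    have hkl : k < s.length := hk
    simp only [prevPosLoopA, lastR, PySem.List.pyGet?_natCast]
    have hto : PySem.List.slice s none (some (k : Int)) = s.take k := by
      rw [PySem.List.slice_to s (by omega)]; simp
    have hfrom : PySem.List.slice s (some ((k : Int) + 1)) none = s.drop (k+1) := by
      rw [PySem.List.slice_from s (by omega),
        show (((k : Int)) + 1).toNat = k + 1 from by omega]
    by_cases hc : s[k]? = some 'r'
    · rw [if_pos hc, if_pos hc, hto, hfrom]
      simp
    · rw [if_neg hc, if_neg hc, hto, hfrom]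
      set s' : List Char := s.take k ++ ['r'] ++ s.drop (k+1) with hs'
      have htk : s'.take k = s.take k := by
        rw [hs', List.append_assoc, List.take_append_of_le_length (by simp; omega),
          List.take_take, Nat.min_self]
      have hpref : ∀ i, i < k → s'[i]? = s[i]? := by
        intro i hi
        rw [← List.getElem?_take_of_lt (l := s') hi, ← List.getElem?_take_of_lt (l := s) hi, htk]
      have hdrop : s'.drop k = 'r' :: s.drop (k+1) := by
        rw [hs', List.append_assoc,
          List.drop_append_of_le_length (by simp; omega)]
        simp
      rw [ih s' (by simp [hs']; omega), lastR_congr s' s k hpref]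
      cases hlr : lastR s k with
      | none => simp [hdrop, List.replicate_succ']
      | some j =>
        have hj : j < k := lastR_lt s k j hlr
        have htj : s'.take j = s.take j := by
          have h := congrArg (List.take j) htk
          simpa [List.take_take, Nat.min_eq_left hj.le] using h
        simp only [htj, hdrop]
        rw [Prod.mk.injEq]
        refine ⟨?_, rfl⟩
        rw [show k + 1 - 1 - j = (k - 1 - j) + 1 from by omega]
        simp [List.replicate_succ', List.cons_append, List.append_assoc]

theorem isPrefixOf_r (t : List Char) : ['r'].isPrefixOf t = (t[0]? == some 'r') := by
  cases t with
  | nil => rfl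
  | cons a t =>
    simp [List.isPrefixOf, eq_comm]

theorem rfind_go_eq (s : List Char) (k : Nat) :
    PySem.Chars.rfind.go s ['r'] k =
      match lastR s (k+1) with
      | some j => (j : Int)
      | none => -1 := by
  induction k with
  | zero =>
    simp only [PySem.Chars.rfind.go, lastR, isPrefixOf_r]
    by_cases h : s[0]? = some 'r' <;> simp [h]
  | succ k ih =>
    simp only [PySem.Chars.rfind.go]
    conv_rhs => rw [lastR]
    rw [isPrefixOf_r]
    have : (s.drop (k+1))[0]? = s[k+1]? := by
      rw [List.getElem?_drop]
    rw [this]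
    by_cases h : s[k+1]? = some 'r' <;> simp [h, ih]

theorem rfind_eq_lastR (s : List Char) :
    PySem.Chars.rfind s ['r'] =
      match lastR s s.length with
      | some j => (j : Int)
      | none => -1 := by
  cases s with
  | nil => rfl
  | cons a t =>
    show PySem.Chars.rfind.go (a :: t) ['r'] (t.length + 1) = _
    rw [rfind_go_eq]
    have : lastR (a :: t) (t.length + 1 + 1) = lastR (a :: t) (t.length + 1) := by
      simp only [lastR]
      rw [List.getElem?_eq_none_iff.mpr (by simp)]
      simp
    rw [this]
    rfl

-- ===== VERDICT (by name: the statement is the Claim_ definition above) =====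
theorem prev_pos_spec : Claim_equal_prev_pos := by
  intro pos _
  unfold Spec_prev_pos
  simp only [prev_pos, prev_pos_alt]
  rw [loopA_spec pos.toList.length pos.toList (le_refl _), rfind_eq_lastR]
  cases hlr : lastR pos.toList pos.toList.length with
  | none =>
    simp only [List.drop_length, List.append_nil]
    simp only [if_true]
    rw [PySem.List.slice_from_one, PySem.List.pyRepeat_singleton]
    congr 1
    cases hp : pos.toList with
    | nil => rfl
    | cons a t =>
      simp only [List.length_cons]
      rw [show ((((t.length + 1 : Nat) : Int)) - 1).toNat = t.length from by omega]
      simp [List.replicate_succ]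
  | some j =>
    have hj : j < pos.toList.length := lastR_lt _ _ j hlr
    rw [if_neg (by omega : ¬ ((j : Int) = -1))]
    simp only [List.drop_length, List.append_nil, Bool.false_eq_true, if_false]
    rw [PySem.List.slice_to pos.toList (by omega), PySem.List.pyRepeat_singleton]
    have h1 : ((j : Int)).toNat = j := by omega
    have h2 : ((pos.toList.length : Int) - j - 1).toNat = pos.toList.length - j - 1 := by omega
    simp only [h1, h2, List.append_assoc, List.singleton_append]
    rw [show pos.toList.length - 1 - j = pos.toList.length - j - 1 from by omega]
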